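-- pv_equiv track=rewrite | github.com/bryonkucharski/text-based-rl-generalization | bert_knowlegde_graph_extractor/ground_truth_textworld.py | process_burning_commands
-- ===== SOURCE A (Python) =====
-- def process_burning_commands(list_of_commands, list_of_triplets):
--     cook = set(["grilled", "fried", "roasted"])
--     burned_stuff = []
--     for c in list_of_commands:
--         if "burned" in c:
--             burned_stuff.append(c.split(",")[1].strip())
--     res = []
--     for bs in burned_stuff:
--         for t in list_of_triplets:
--             if bs not in t:
--                 continue
--             intersection = set(t) & cook
--             if len(intersection) == 0:
--                 continue
--             res.append("delete , " + bs + " , " + list(intersection)[0] + " , is")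
--             break
--     return list_of_commands +  res
-- ===== SOURCE B (Python) =====
-- def process_burning_commands(list_of_commands, list_of_triplets):
--     cook = ("grilled", "fried", "roasted")
--     # index the triplets once: item -> cook word of the earliest cooked triplet containing it
--     item_to_cook = {}
--     for t in list_of_triplets:
--         w = next((c for c in cook if c in t), None)
--         if w is None:
--             continue
--         for e in t:
--             item_to_cook.setdefault(e, w)
--     burned = (c.split(",")[1].strip() for c in list_of_commands if "burned" in c)
--     res = ["delete , " + bs + " , " + item_to_cook[bs] + " , is"
--            for bs in burned if bs in item_to_cook]
--     return list_of_commands + res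
-- ===== Notes on version B (the rewrite author's own statement) =====
-- stated objective: alternative
-- what changed: B replaces A's per-burned-item rescan of all triplets with a single indexing pass that builds a dict item -> cook word of the earliest cooked triplet containing it, then one lookup per burned item (fewer triplet scans, but not measurably faster on the benchmarked inputs).
import Mathlib
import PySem

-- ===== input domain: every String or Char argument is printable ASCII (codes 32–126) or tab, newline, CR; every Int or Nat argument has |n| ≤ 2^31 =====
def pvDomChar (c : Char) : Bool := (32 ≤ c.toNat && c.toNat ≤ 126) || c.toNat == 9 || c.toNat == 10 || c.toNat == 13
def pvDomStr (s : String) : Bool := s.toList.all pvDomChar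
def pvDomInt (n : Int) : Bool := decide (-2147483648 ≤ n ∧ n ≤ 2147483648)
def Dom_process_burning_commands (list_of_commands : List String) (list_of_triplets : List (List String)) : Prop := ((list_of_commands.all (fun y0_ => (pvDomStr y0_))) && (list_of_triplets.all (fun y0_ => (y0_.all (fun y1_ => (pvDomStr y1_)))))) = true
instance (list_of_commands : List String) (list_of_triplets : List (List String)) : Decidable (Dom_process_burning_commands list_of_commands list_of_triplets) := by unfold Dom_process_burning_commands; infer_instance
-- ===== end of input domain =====

-- B replaces A's per-burned-item rescan of all triplets by one indexing pass over the
-- triplets (dict item → cook word of the earliest cooked triplet containing it) and a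
-- dict lookup per burned item (equivalence is about the return value; neither mutates inputs).

-- ===== PORT A =====

-- cook = set(["grilled", "fried", "roasted"])
def pvCook : PySem.Set String := PySem.Set.ofList ["grilled", "fried", "roasted"]

-- first loop of A: collect c.split(",")[1].strip() for commands containing "burned"
-- (c.split(",")[1] raises IndexError when there is no comma; those inputs are outside Pre_,
--  so the total pyGetD with default "" is exact on Pre_)
def pvBurnedA (list_of_commands : List String) : List String :=
  list_of_commands.foldl (fun acc c =>
    if PySem.Str.isIn "burned" c then
      acc ++ [PySem.Str.strip (PySem.List.pyGetD ((PySem.Str.split? c ",").getD []) 1 "")]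
    else acc) []

-- inner 'for t in list_of_triplets: … break' of A, as a first-hit recursion
def pvFindCookA (bs : String) : List (List String) → Option String
  | [] => none
  | t :: ts =>
    if t.contains bs = false then pvFindCookA bs ts          -- if bs not in t: continue
    else
      let intersection := PySem.Set.inter (PySem.Set.ofList t) pvCook
      if PySem.Set.len intersection == 0 then pvFindCookA bs ts   -- if len(...) == 0: continue
      else some (intersection.headD "")                       -- list(intersection)[0] (nonempty by the guard)

def process_burning_commands (list_of_commands : List String) (list_of_triplets : List (List String)) : List String :=
  let burned_stuff := pvBurnedA list_of_commands
  let res := burned_stuff.foldl (fun r bs =>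
    match pvFindCookA bs list_of_triplets with
    | some w => r ++ ["delete , " ++ bs ++ " , " ++ w ++ " , is"]
    | none => r) []
  list_of_commands ++ res

-- ===== PORT B =====

-- cook = ("grilled", "fried", "roasted")
def pvCookList : List String := ["grilled", "fried", "roasted"]

-- one pass over the triplets: item -> cook word of the earliest cooked triplet containing it
def pvIndexB (list_of_triplets : List (List String)) : PySem.Dict String String :=
  list_of_triplets.foldl (fun d t =>
    match pvCookList.find? (fun w => t.contains w) with    -- next((c for c in cook if c in t), None)
    | none => d
    | some w => t.foldl (fun d e => d.setdefault e w) d)   -- item_to_cook.setdefault(e, w)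
    PySem.Dict.empty

def process_burning_commands_alt (list_of_commands : List String) (list_of_triplets : List (List String)) : List String :=
  let item_to_cook := pvIndexB list_of_triplets
  let burned := list_of_commands.filterMap (fun c =>
    if PySem.Str.isIn "burned" c then
      some (PySem.Str.strip (PySem.List.pyGetD ((PySem.Str.split? c ",").getD []) 1 ""))
    else none)
  let res := burned.filterMap (fun bs =>
    (item_to_cook.get? bs).map (fun w => "delete , " ++ bs ++ " , " ++ w ++ " , is"))
  list_of_commands ++ res

-- ===== PRECONDITION & SPEC =====
-- Pre_ excludes (i) commands containing "burned" but no comma, on which A raises IndexError,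
-- and (ii) triplets containing more than one distinct cook word, on which A's output string
-- list(set(t) & cook)[0] is an accident of Python's set hash order.
def Pre_process_burning_commands (list_of_commands : List String) (list_of_triplets : List (List String)) : Prop :=
  (∀ c ∈ list_of_commands, PySem.Str.isIn "burned" c = true → 2 ≤ ((PySem.Str.split? c ",").getD []).length) ∧
  (∀ t ∈ list_of_triplets, ((["grilled", "fried", "roasted"] : List String).filter (fun w => t.contains w)).length ≤ 1)
instance (list_of_commands : List String) (list_of_triplets : List (List String)) : Decidable (Pre_process_burning_commands list_of_commands list_of_triplets) := by unfold Pre_process_burning_commands; infer_instance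

def pvWitness_process_burning_commands : List String × List (List String) :=
  (["burned, apple , kitchen", "go north"], [["apple", "fried", "counter"], ["pear", "raw"]])

def Spec_process_burning_commands (list_of_commands : List String) (list_of_triplets : List (List String)) (out : List String) : Prop := out = process_burning_commands_alt list_of_commands list_of_triplets
instance (list_of_commands : List String) (list_of_triplets : List (List String)) (out : List String) : Decidable (Spec_process_burning_commands list_of_commands list_of_triplets out) := by unfold Spec_process_burning_commands; infer_instance

-- ===== CLAIM (what is proved, stated in full; the proofs are below) =====
def Claim_equal_process_burning_commands : Prop := ∀ (list_of_commands : List String) (list_of_triplets : List (List String)), Dom_process_burning_commands list_of_commands list_of_triplets → Pre_process_burning_commands list_of_commands list_of_triplets → Spec_process_burning_commands list_of_commands list_of_triplets (process_burning_commands list_of_commands list_of_triplets)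

-- ===== LEMMAS AND PROOFS =====

-- a nodup list whose members are exactly {w} is [w]
theorem pv_eq_singleton_of_nodup {α : Type} (l : List α) (w : α)
    (hnd : l.Nodup) (hmem : ∀ x, x ∈ l ↔ x = w) : l = [w] := by
  cases l with
  | nil => exact absurd ((hmem w).mpr rfl) (List.not_mem_nil)
  | cons a rest =>
    have ha : a = w := (hmem a).mp List.mem_cons_self
    subst ha
    have : rest = [] := by
      cases rest with
      | nil => rfl
      | cons b r =>
        have hb : b = a := (hmem b).mp (List.mem_cons_of_mem _ List.mem_cons_self)
        subst hb
        exact absurd (List.mem_cons_self) (List.nodup_cons.mp hnd).1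
    simp [this]

-- under the ≤1-cook-word condition, A's set intersection and B's find? agree:
-- either the triplet has no cook word (and the intersection is empty), or both pick the same unique word w
theorem pv_cook_cases (t : List String)
    (h : (pvCookList.filter (fun w => t.contains w)).length ≤ 1) :
    (pvCookList.find? (fun w => t.contains w) = none ∧
       PySem.Set.inter (PySem.Set.ofList t) pvCook = []) ∨
    (∃ w, pvCookList.find? (fun w => t.contains w) = some w ∧
       PySem.Set.inter (PySem.Set.ofList t) pvCook = [w]) := by
  cases hf : pvCookList.find? (fun w => t.contains w) with
  | none =>
    left
    refine ⟨rfl, List.eq_nil_iff_forall_not_mem.mpr ?_⟩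
    intro x hx
    have hx' := (PySem.Set.mem_inter _ _ x).mp hx
    have hxt : x ∈ t := (PySem.Set.mem_ofList t x).mp hx'.1
    have hxc : x ∈ pvCookList := by
      have := hx'.2
      simp only [pvCook] at this
      exact (PySem.Set.mem_ofList _ x).mp this
    have := List.find?_eq_none.mp hf x hxc
    simp [hxt] at this
  | some w =>
    right
    refine ⟨w, rfl, ?_⟩
    have hwc : w ∈ pvCookList := List.mem_of_find?_eq_some hf
    have hwt : w ∈ t := by
      have := List.find?_some hf
      simpa using this
    -- uniqueness: any cook word in t equals w
    have huniq : ∀ x, x ∈ pvCookList → x ∈ t → x = w := by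
      intro x hxc hxt
      by_contra hne
      have hx : x ∈ pvCookList.filter (fun w => t.contains w) := by
        simp [List.mem_filter, hxc, hxt]
      have hw : w ∈ pvCookList.filter (fun w => t.contains w) := by
        simp [List.mem_filter, hwc, hwt]
      have hsub : [x, w] ⊆ pvCookList.filter (fun w => t.contains w) := by
        intro y hy
        simp only [List.mem_cons, List.not_mem_nil, or_false] at hy
        rcases hy with rfl | rfl
        · exact hx
        · exact hw
      have hnd : ([x, w] : List String).Nodup := by simp [hne]
      have := (List.subperm_of_subset hnd hsub).length_le
      simp only [List.length_cons, List.length_nil] at this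
      omega
    apply pv_eq_singleton_of_nodup _ _ (PySem.Set.nodup_inter _ _ (PySem.Set.nodup_ofList t))
    intro x
    constructor
    · intro hx
      have hx' := (PySem.Set.mem_inter _ _ x).mp hx
      refine huniq x ?_ ((PySem.Set.mem_ofList t x).mp hx'.1)
      have := hx'.2
      simp only [pvCook] at this
      exact (PySem.Set.mem_ofList _ x).mp this
    · intro hxw
      rw [hxw]
      refine (PySem.Set.mem_inter _ _ w).mpr ⟨(PySem.Set.mem_ofList t w).mpr hwt, ?_⟩
      simp only [pvCook]
      exact (PySem.Set.mem_ofList _ w).mpr (by simpa [pvCookList] using hwc)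

-- the setdefault loop over one triplet, as a lookup
theorem pv_setdefault_fold (t : List String) (d : PySem.Dict String String) (w bs : String) :
    (t.foldl (fun d e => d.setdefault e w) d).get? bs =
      (d.get? bs).or (if t.contains bs then some w else none) := by
  induction t generalizing d with
  | nil => simp
  | cons e es ih =>
    simp only [List.foldl_cons, ih]
    by_cases hbe : bs = e
    · subst hbe
      rw [PySem.Dict.get?_setdefault_self]
      cases hd : d.get? bs <;> simp
    · rw [PySem.Dict.get?_setdefault_of_ne d w hbe]
      have hcc : (e :: es).contains bs = es.contains bs := by simp [hbe]
      rw [hcc]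

-- the indexing pass computes exactly A's first-hit search
theorem pv_index_eq_find (list_of_triplets : List (List String))
    (hp : ∀ t ∈ list_of_triplets, ((["grilled", "fried", "roasted"] : List String).filter (fun w => t.contains w)).length ≤ 1)
    (d : PySem.Dict String String) (bs : String) :
    (list_of_triplets.foldl (fun d t =>
        match pvCookList.find? (fun w => t.contains w) with
        | none => d
        | some w => t.foldl (fun d e => d.setdefault e w) d) d).get? bs =
      (d.get? bs).or (pvFindCookA bs list_of_triplets) := by
  induction list_of_triplets generalizing d with
  | nil => simp [pvFindCookA]
  | cons t ts ih =>
    have hpt : (pvCookList.filter (fun w => t.contains w)).length ≤ 1 := by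
      simpa [pvCookList] using hp t (List.mem_cons_self)
    have hpts : ∀ t' ∈ ts, ((["grilled", "fried", "roasted"] : List String).filter (fun w => t'.contains w)).length ≤ 1 :=
      fun t' ht' => hp t' (List.mem_cons_of_mem _ ht')
    simp only [List.foldl_cons]
    rcases pv_cook_cases t hpt with ⟨hf, hi⟩ | ⟨w, hf, hi⟩
    · rw [hf, ih hpts]
      congr 1
      -- no cook word in t: both branches of pvFindCookA on t reduce to the recursion
      simp only [pvFindCookA, hi]
      cases hc : t.contains bs <;> simp [PySem.Set.len]
    · rw [hf, ih hpts, pv_setdefault_fold]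
      simp only [pvFindCookA, hi]
      cases hc : t.contains bs
      · simp
      · simp only [reduceIte, PySem.Set.len]
        cases hd : d.get? bs <;> simp

-- foldl with an option-guarded append is a filterMap
theorem pv_foldl_opt_append {α : Type} (F : α → Option String) (g : α → String → String)
    (l : List α) (acc : List String) :
    l.foldl (fun r x =>
      match F x with
      | some w => r ++ [g x w]
      | none => r) acc = acc ++ l.filterMap (fun x => (F x).map (g x)) := by
  induction l generalizing acc with
  | nil => simp
  | cons x xs ih =>
    simp only [List.foldl_cons, List.filterMap_cons]
    cases hF : F x <;> simp [ih]

-- map-over-filter is a guarded filterMap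
theorem pv_map_filter {α β : Type} (p : α → Bool) (f : α → β) (l : List α) :
    (l.filter p).map f = l.filterMap (fun x => if p x then some (f x) else none) := by
  induction l with
  | nil => simp
  | cons a as ih => cases h : p a <;> simp [h, ih]

-- A's burned_stuff loop is B's filterMap
theorem pv_burned_eq (list_of_commands : List String) :
    pvBurnedA list_of_commands =
      list_of_commands.filterMap (fun c =>
        if PySem.Str.isIn "burned" c then
          some (PySem.Str.strip (PySem.List.pyGetD ((PySem.Str.split? c ",").getD []) 1 ""))
        else none) := by
  unfold pvBurnedA
  rw [PySem.List.foldl_append_if, pv_map_filter]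
  simp

-- ===== VERDICT (by name: the statement is the Claim_ definition above) =====
theorem process_burning_commands_spec : Claim_equal_process_burning_commands := by
  intro list_of_commands list_of_triplets _hdom hpre
  unfold Spec_process_burning_commands
  unfold process_burning_commands process_burning_commands_alt
  dsimp only
  rw [pv_burned_eq]
  congr 1
  rw [pv_foldl_opt_append (fun bs => pvFindCookA bs list_of_triplets)
        (fun bs w => "delete , " ++ bs ++ " , " ++ w ++ " , is")]
  rw [List.nil_append]
  apply List.filterMap_congr
  intro bs _
  have h := pv_index_eq_find list_of_triplets hpre.2 PySem.Dict.empty bs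
  unfold pvIndexB
  rw [h]
  simp
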